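-- pv_equiv track=rewrite | github.com/liza0525/algorithm-study | Programmers/weekly_challenge/week4_recommand_job.py | solution
-- ===== SOURCE A (Python) =====
-- def solution(tables, languages, preferences):
--     def get_score(priority_language_dict):
--         total_score = 0
--         for language, score in candidate_dict.items():
--             if language in priority_language_dict:
--                 total_score += score * priority_language_dict[language]
--
--         return total_score
--
--     candidate_dict = {
--         language: preference
--         for language, preference in zip(languages, preferences)
--     }
--
--     score_dict = {}
--     for table in tables:
--         priority_language_list = table.split()
--         job = priority_language_list.pop(0)
--         priority_language_dict = {
--             priority_language: 5 - i
--             for i, priority_language in enumerate(priority_language_list)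
--         }
--         score_dict[job] = get_score(priority_language_dict)
--
--     score_list = sorted(score_dict.items(), key=lambda x: (-x[1], x[0]))
--     return max(score_list, key=lambda x: x[1])[0]
-- ===== SOURCE B (Python) =====
-- def solution(tables, languages, preferences):
--     pref = dict(zip(languages, preferences))
--     seen = set()
--     best_job = None
--     best_score = None
--     # walk the tables backwards so that, for a repeated job name, the last
--     # listing is the one that counts; keep a single running best instead of
--     # a score dict plus sort.
--     for table in reversed(tables):
--         job, *langs = table.split()
--         if job in seen:
--             continue
--         seen.add(job)
--         weight = {lang: 5 - i for i, lang in enumerate(langs)}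
--         score = sum(pref.get(lang, 0) * w for lang, w in weight.items())
--         if best_job is None or score > best_score \
--                 or (score == best_score and job < best_job):
--             best_job, best_score = job, score
--     return best_job
-- ===== Notes on version B (the rewrite author's own statement) =====
-- stated objective: faster
-- what changed: B drops A's score_dict plus sort plus max: it walks the tables once in reverse with a seen-set (so the last listing of a repeated job counts, as with A's dict overwrite), keeps a single running best (job, score) pair updated on strictly better score or equal score with lexicographically smaller name, and scores each table by iterating the table's own few priority weights against a language->preference dict instead of scanning the whole candidate dict per table.
import Mathlib
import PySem

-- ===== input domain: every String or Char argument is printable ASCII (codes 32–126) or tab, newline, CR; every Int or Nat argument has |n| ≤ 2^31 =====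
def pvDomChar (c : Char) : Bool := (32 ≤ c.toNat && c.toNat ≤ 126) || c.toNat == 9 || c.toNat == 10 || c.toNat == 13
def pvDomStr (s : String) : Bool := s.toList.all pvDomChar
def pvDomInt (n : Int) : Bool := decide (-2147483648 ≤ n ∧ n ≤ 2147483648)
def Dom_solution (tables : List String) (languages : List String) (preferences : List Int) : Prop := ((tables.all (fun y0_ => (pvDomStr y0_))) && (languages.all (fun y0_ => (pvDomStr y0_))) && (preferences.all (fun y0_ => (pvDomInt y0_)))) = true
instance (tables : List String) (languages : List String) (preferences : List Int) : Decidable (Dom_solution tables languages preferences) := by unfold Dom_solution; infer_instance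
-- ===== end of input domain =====

-- B replaces A's score_dict + sort + max with one backward pass keeping a running best (job, score)
-- and a seen-set (so that for a repeated job name the last listing counts, as with A's dict), and
-- scores each table by iterating the table's own priority weights instead of the candidate dict.

-- ===== PORT A =====
def solution (tables : List String) (languages : List String) (preferences : List Int) : String :=
  let candidate_dict : PySem.Dict String Int :=
    (languages.zip preferences).foldl (fun d p => d.insert p.1 p.2) PySem.Dict.empty
  let get_score : PySem.Dict String Int → Int := fun priority_language_dict =>
    candidate_dict.items.foldl
      (fun total_score p =>
        if priority_language_dict.contains p.1 then
          total_score + p.2 * priority_language_dict.getD p.1 0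
        else total_score) 0
  let score_dict : PySem.Dict String Int :=
    tables.foldl (fun d table =>
      match PySem.Str.split₀ table with
      | [] => d  -- Python: pop(0) on [] raises IndexError; such tables are excluded by Pre_solution
      | job :: priority_language_list =>
          d.insert job (get_score
            ((PySem.List.enumerate priority_language_list).foldl
              (fun pd q => pd.insert q.2 (5 - q.1)) PySem.Dict.empty)))
      PySem.Dict.empty
  let score_list :=
    PySem.List.sorted2 score_dict.items (fun x => -x.2) (fun x => x.1) false
  -- max([]) raises ValueError; tables = [] is excluded by Pre_solution
  ((PySem.List.max? score_list (fun x => x.2)).map (fun x => x.1)).getD ""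

-- ===== PORT B =====
def solution_alt (tables : List String) (languages : List String) (preferences : List Int) : String :=
  let pref : PySem.Dict String Int :=
    (languages.zip preferences).foldl (fun d p => d.insert p.1 p.2) PySem.Dict.empty
  let st : PySem.Set String × Option (String × Int) :=
    tables.reverse.foldl (fun st table =>
      match PySem.Str.split₀ table with
      | [] => st  -- Source B: unpacking [] raises ValueError; such tables are excluded by Pre_solution
      | job :: langs =>
          if PySem.Set.contains st.1 job then st  -- continue
          else
            let seen := PySem.Set.add st.1 job
            let weight : PySem.Dict String Int :=
              (PySem.List.enumerate langs).foldl
                (fun d q => d.insert q.2 (5 - q.1)) PySem.Dict.empty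
            let score := (weight.items.map (fun q => pref.getD q.1 0 * q.2)).sum
            match st.2 with
            | none => (seen, some (job, score))
            | some b =>
                if score > b.2 ∨ (score = b.2 ∧ job < b.1) then (seen, some (job, score))
                else (seen, st.2))
      (PySem.Set.empty, none)
  -- Source B returns None when tables = []; excluded by Pre_solution
  (st.2.map (fun b => b.1)).getD ""

-- ===== PRECONDITION & SPEC =====
-- Pre_ excludes exactly the inputs on which A raises: an empty `tables` (max() over an empty
-- sequence raises ValueError) and a `tables` entry without any whitespace-separated token
-- (pop(0) on the empty split raises IndexError).
def Pre_solution (tables : List String) (languages : List String) (preferences : List Int) : Prop :=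
  tables ≠ [] ∧ ∀ t ∈ tables, PySem.Str.split₀ t ≠ []
instance (tables : List String) (languages : List String) (preferences : List Int) : Decidable (Pre_solution tables languages preferences) := by unfold Pre_solution; infer_instance

def pvWitness_solution : List String × List String × List Int :=
  (["jobA python java", "jobB c"], ["python", "c"], [3, 2])

def Spec_solution (tables : List String) (languages : List String) (preferences : List Int) (out : String) : Prop := out = solution_alt tables languages preferences
instance (tables : List String) (languages : List String) (preferences : List Int) (out : String) : Decidable (Spec_solution tables languages preferences out) := by unfold Spec_solution; infer_instance

-- ===== CLAIM (what is proved, stated in full; the proofs are below) =====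
def Claim_equal_solution : Prop := ∀ (tables : List String) (languages : List String) (preferences : List Int), Dom_solution tables languages preferences → Pre_solution tables languages preferences → Spec_solution tables languages preferences (solution tables languages preferences)

-- ===== LEMMAS AND PROOFS =====

-- Proof-side abbreviations for pieces of the two ports.
def pvJob (t : String) : String := (PySem.Str.split₀ t).headD ""

def pvCand (languages : List String) (preferences : List Int) : PySem.Dict String Int :=
  (languages.zip preferences).foldl (fun d p => d.insert p.1 p.2) PySem.Dict.empty

def pvPrio (t : String) : PySem.Dict String Int :=
  (PySem.List.enumerate (PySem.Str.split₀ t).tail).foldl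
    (fun pd q => pd.insert q.2 (5 - q.1)) PySem.Dict.empty

-- B's score of one table
def pvScore (languages : List String) (preferences : List Int) (t : String) : Int :=
  ((pvPrio t).items.map (fun q => (pvCand languages preferences).getD q.1 0 * q.2)).sum

-- A's score of one table (get_score applied to the table's priority dict)
def pvScoreA (languages : List String) (preferences : List Int) (t : String) : Int :=
  (pvCand languages preferences).items.foldl
    (fun total q =>
      if (pvPrio t).contains q.1 then total + q.2 * (pvPrio t).getD q.1 0 else total) 0

-- the sort/compare key Python's (-score, name) tuple denotes
def pvKey (x : String × Int) : Lex (Int × String) := toLex (-x.2, x.1)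

-- the (job, score) pairs B actually processes: first occurrence per job, walking ts
def pvDedup (languages : List String) (preferences : List Int)
    (seen : List String) : List String → List (String × Int)
  | [] => []
  | t :: ts =>
      if pvJob t ∈ seen then pvDedup languages preferences seen ts
      else (pvJob t, pvScore languages preferences t) ::
        pvDedup languages preferences (pvJob t :: seen) ts

-- B's congruence target: one step of the backward loop
def pvStepB (languages : List String) (preferences : List Int)
    (st : PySem.Set String × Option (String × Int)) (t : String) :
    PySem.Set String × Option (String × Int) :=
  if PySem.Set.contains st.1 (pvJob t) then st
  else
    match st.2 with
    | none => (PySem.Set.add st.1 (pvJob t),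
        some (pvJob t, pvScore languages preferences t))
    | some b =>
        if pvScore languages preferences t > b.2 ∨
            (pvScore languages preferences t = b.2 ∧ pvJob t < b.1) then
          (PySem.Set.add st.1 (pvJob t), some (pvJob t, pvScore languages preferences t))
        else (PySem.Set.add st.1 (pvJob t), st.2)

-- lookup in a cons-cell dict
theorem pv_getD_cons (q : String × Int) (M : List (String × Int)) (k : String) :
    (PySem.Dict.mk (q :: M)).getD k 0 = if q.1 = k then q.2 else (PySem.Dict.mk M).getD k 0 := by
  by_cases h : q.1 = k <;>
    simp [PySem.Dict.getD_eq_get?_getD, PySem.Dict.get?, List.find?_cons, h]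

-- in a key-nodup association list, the sum of the values at one key is the dict lookup
theorem pv_sum_filter_eq_getD (L : List (String × Int)) (k : String)
    (h : (L.map (fun p => p.1)).Nodup) :
    ((L.filter (fun p => p.1 == k)).map (fun p => p.2)).sum = (PySem.Dict.mk L).getD k 0 := by
  induction L with
  | nil => simp [PySem.Dict.getD, PySem.Dict.get?]
  | cons p L ih =>
    simp only [List.map_cons, List.nodup_cons] at h
    rw [pv_getD_cons]
    by_cases hp : p.1 = k
    · have hnot : ∀ q ∈ L, ¬ (q.1 == k) = true := by
        intro q hq hqk
        exact h.1 (by subst hp; rw [List.mem_map]; exact ⟨q, hq, by simpa using hqk⟩)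
      rw [List.filter_cons_of_pos (by simp [hp])]
      rw [List.filter_eq_nil_iff.mpr hnot]
      simp [hp]
    · rw [List.filter_cons_of_neg (by simp [hp])]
      rw [ih h.2, if_neg hp]

-- a sum over a filter by a disjunction of disjoint tests splits
theorem pv_sum_filter_or (L : List (String × Int)) (a b : String × Int → Bool)
    (f : String × Int → Int) (hd : ∀ p, ¬ (a p = true ∧ b p = true)) :
    ((L.filter (fun p => a p || b p)).map f).sum
      = ((L.filter a).map f).sum + ((L.filter b).map f).sum := by
  induction L with
  | nil => simp
  | cons p L ih =>
    by_cases ha : a p = true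
    · have hb : b p = false := eq_false_of_ne_true (fun hb => hd p ⟨ha, hb⟩)
      simp only [List.filter_cons, ha, hb, Bool.true_or, if_true]
      simp only [List.map_cons, List.sum_cons, ih]
      simp only [Bool.false_eq_true, if_false]
      ring
    · have ha' : a p = false := eq_false_of_ne_true ha
      by_cases hb : b p = true
      · simp only [List.filter_cons, ha', hb, Bool.false_or, if_true]
        simp only [List.map_cons, List.sum_cons, ih]
        simp only [Bool.false_eq_true, if_false]
        ring
      · have hb' : b p = false := eq_false_of_ne_true hb
        simp only [List.filter_cons, ha', hb', Bool.false_or, Bool.false_eq_true, if_false]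
        exact ih

-- the scoring swap: iterating one key-nodup dict and looking up in the other may go either way round
theorem pv_score_swap (L M : List (String × Int))
    (hL : (L.map (fun p => p.1)).Nodup) (hM : (M.map (fun p => p.1)).Nodup) :
    ((L.filter (fun p => (PySem.Dict.mk M).contains p.1)).map
        (fun p => p.2 * (PySem.Dict.mk M).getD p.1 0)).sum
      = (M.map (fun q => (PySem.Dict.mk L).getD q.1 0 * q.2)).sum := by
  induction M with
  | nil =>
    simp [PySem.Dict.contains]
  | cons q M ih =>
    simp only [List.map_cons, List.nodup_cons] at hM
    have hqM : ∀ p : String × Int, p.1 ∈ M.map (fun p => p.1) → ¬ p.1 = q.1 := by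
      intro p hp he; exact hM.1 (he ▸ hp)
    have hmem : ∀ p : String × Int, (PySem.Dict.mk M).contains p.1 = true →
        p.1 ∈ M.map (fun r => r.1) := by
      intro p h2
      simp only [PySem.Dict.contains, List.any_eq_true] at h2
      obtain ⟨r, hr, hrk⟩ := h2
      rw [List.mem_map]; exact ⟨r, hr, by simpa using hrk⟩
    have hcont : ∀ p : String × Int,
        (PySem.Dict.mk ((q :: M) : List (String × Int))).contains p.1
          = ((p.1 == q.1) || (PySem.Dict.mk M).contains p.1) := by
      intro p
      simp only [PySem.Dict.contains, List.any_cons]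
      rw [BEq.comm]
    rw [List.filter_congr (fun p _ => hcont p)]
    rw [pv_sum_filter_or _ _ _ _ (by
      intro p ⟨h1, h2⟩
      exact hqM p (hmem p h2) (by simpa using h1))]
    have part1 : ((L.filter (fun p => p.1 == q.1)).map
        (fun p => p.2 * (PySem.Dict.mk (q :: M)).getD p.1 0)).sum
        = (PySem.Dict.mk L).getD q.1 0 * q.2 := by
      rw [List.map_congr_left (fun p hp => by
        have h1 : p.1 = q.1 := by simpa using (List.mem_filter.mp hp).2
        show p.2 * (PySem.Dict.mk (q :: M)).getD p.1 0 = p.2 * q.2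
        rw [h1, pv_getD_cons, if_pos rfl])]
      rw [List.sum_map_mul_right]
      rw [pv_sum_filter_eq_getD L q.1 hL]
    have part2 : ((L.filter (fun p => (PySem.Dict.mk M).contains p.1)).map
        (fun p => p.2 * (PySem.Dict.mk (q :: M)).getD p.1 0)).sum
        = (M.map (fun r => (PySem.Dict.mk L).getD r.1 0 * r.2)).sum := by
      rw [List.map_congr_left (fun p hp => by
        have hpm : (PySem.Dict.mk M).contains p.1 = true := by
          simpa using (List.mem_filter.mp hp).2
        have hne : ¬ p.1 = q.1 := hqM p (hmem p hpm)
        show p.2 * (PySem.Dict.mk (q :: M)).getD p.1 0 = p.2 * (PySem.Dict.mk M).getD p.1 0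
        rw [pv_getD_cons, if_neg (fun hh => hne hh.symm)])]
      exact ih hM.2
    rw [part1, part2]
    simp

theorem pv_cand_nodup (languages : List String) (preferences : List Int) :
    ((pvCand languages preferences).items.map (fun q => q.1)).Nodup := by
  have := PySem.Dict.nodup_keys_foldl_insert_key (languages.zip preferences)
    (fun q : String × Int => q.1) (fun _ q => q.2) PySem.Dict.empty PySem.Dict.nodup_keys_empty
  simpa [PySem.Dict.keys, pvCand] using this

theorem pv_prio_nodup (t : String) :
    ((pvPrio t).items.map (fun q => q.1)).Nodup := by
  have := PySem.Dict.nodup_keys_foldl_insert_key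
    (PySem.List.enumerate (PySem.Str.split₀ t).tail)
    (fun q : Int × String => q.2) (fun _ q => 5 - q.1) PySem.Dict.empty PySem.Dict.nodup_keys_empty
  simpa [PySem.Dict.keys, pvPrio] using this

-- A's get_score equals B's per-table score
theorem pv_get_score_eq (languages : List String) (preferences : List Int) (t : String) :
    pvScoreA languages preferences t = pvScore languages preferences t := by
  unfold pvScoreA pvScore
  rw [PySem.List.foldl_if_eq_foldl_filter (p := fun q : String × Int => (pvPrio t).contains q.1)
    (f := fun total (q : String × Int) => total + q.2 * (pvPrio t).getD q.1 0)]
  rw [PySem.List.foldl_add _ (fun q : String × Int => q.2 * (pvPrio t).getD q.1 0) 0, zero_add]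
  exact pv_score_swap _ _ (pv_cand_nodup languages preferences) (pv_prio_nodup t)

-- sorted2 with keys (-score, name) is sorted with the single lexicographic key pvKey
theorem pv_sorted2_eq (P : List (String × Int)) :
    PySem.List.sorted2 P (fun x => -x.2) (fun x => x.1) false
      = PySem.List.sorted P pvKey false := by
  rw [PySem.List.sorted_eq_foldl_insertBy]
  unfold PySem.List.sorted2
  simp only [if_neg (by decide : ¬ (false = true))]
  congr 1
  funext acc x
  congr 1
  funext a b
  show (decide (-a.2 < -b.2) || !decide (-b.2 < -a.2) && decide (a.1 < b.1))
      = decide (pvKey a < pvKey b)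
  unfold pvKey
  by_cases h1 : (-a.2 : Int) < -b.2
  · simp [h1, Prod.Lex.toLex_lt_toLex]
  · by_cases h2 : (-b.2 : Int) < -a.2
    · simp [h1, h2, Prod.Lex.toLex_lt_toLex]
      omega
    · have he : (-a.2 : Int) = -b.2 := by omega
      by_cases h3 : a.1 < b.1 <;> simp [h3, Prod.Lex.toLex_lt_toLex, he] <;> omega

-- max? keeps its first element when nothing later is strictly larger
theorem pv_max?_stays (t : List (String × Int)) (m : String × Int)
    (h : ∀ y ∈ t, ¬ (m.2 < y.2)) :
    t.foldl (fun acc x => match acc with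
      | none => some x
      | some mm => if mm.2 < x.2 then some x else some mm) (some m) = some m := by
  induction t with
  | nil => rfl
  | cons y t ih =>
    simp only [List.foldl_cons]
    rw [if_neg (h y (by simp))]
    exact ih (fun z hz => h z (by simp [hz]))

-- B's improvement test is exactly a pvKey-decrease
theorem pv_cond_iff (p b : String × Int) :
    (p.2 > b.2 ∨ (p.2 = b.2 ∧ p.1 < b.1)) ↔ pvKey p < pvKey b := by
  unfold pvKey
  rw [Prod.Lex.toLex_lt_toLex]
  constructor
  · rintro (h | ⟨h1, h2⟩)
    · exact Or.inl (by omega)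
    · exact Or.inr ⟨by omega, h2⟩
  · rintro (h | ⟨h1, h2⟩)
    · exact Or.inl (by omega)
    · exact Or.inr ⟨by omega, h2⟩

-- B's running best computes a first minimum of pvKey
theorem pv_runmin (L : List (String × Int)) (b : String × Int) :
    ∃ r, L.foldl (fun best p => match best with
        | none => some p
        | some bb => if p.2 > bb.2 ∨ (p.2 = bb.2 ∧ p.1 < bb.1) then some p else best)
        (some b) = some r ∧ (r = b ∨ r ∈ L) ∧ ∀ y ∈ b :: L, ¬ (pvKey y < pvKey r) := by
  induction L generalizing b with
  | nil => exact ⟨b, rfl, Or.inl rfl, by simp⟩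
  | cons p L ih =>
    simp only [List.foldl_cons]
    by_cases hc : p.2 > b.2 ∨ (p.2 = b.2 ∧ p.1 < b.1)
    · rw [if_pos hc]
      obtain ⟨r, hr, hm, hmin⟩ := ih p
      refine ⟨r, hr, by rcases hm with h|h <;> exact Or.inr (by simp [h]), ?_⟩
      intro y hy
      have h2 := (pv_cond_iff p b).mp hc
      rcases hy with _ | ⟨_, hy⟩
      · intro hlt
        exact hmin p (by simp) (lt_trans h2 hlt)
      · exact hmin y hy
    · rw [if_neg hc]
      obtain ⟨r, hr, hm, hmin⟩ := ih b
      refine ⟨r, hr, by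
        rcases hm with h|h
        exacts [Or.inl h, Or.inr (List.mem_cons_of_mem _ h)], ?_⟩
      intro y hy
      rcases hy with _ | ⟨_, hy⟩
      · exact hmin b (by simp)
      rcases hy with _ | ⟨_, hy⟩
      · intro hlt
        have hb := hmin b (by simp)
        have h2 : ¬ pvKey p < pvKey b := fun hh => hc ((pv_cond_iff p b).mpr hh)
        exact h2 (lt_of_lt_of_le hlt (not_lt.mp hb))
      · exact hmin y (List.mem_cons_of_mem _ hy)

-- B's backward loop is the running best over pvDedup of the walked list
theorem pv_foldB (languages : List String) (preferences : List Int) :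
    ∀ (ts : List String) (seenS : PySem.Set String) (seenL : List String)
      (best : Option (String × Int)),
      (∀ x, x ∈ seenS ↔ x ∈ seenL) →
      (ts.foldl (pvStepB languages preferences) (seenS, best)).2
        = (pvDedup languages preferences seenL ts).foldl (fun best p => match best with
            | none => some p
            | some bb => if p.2 > bb.2 ∨ (p.2 = bb.2 ∧ p.1 < bb.1) then some p else best) best := by
  intro ts
  induction ts with
  | nil => intro _ _ _ _; rfl
  | cons t ts ih =>
    intro seenS seenL best hsm
    rw [List.foldl_cons, pvDedup]
    by_cases hmem : pvJob t ∈ seenL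
    · have hc : PySem.Set.contains seenS (pvJob t) = true := by
        simp only [PySem.Set.contains, List.contains_iff_mem]
        exact (hsm _).mpr hmem
      have hstep : pvStepB languages preferences (seenS, best) t = (seenS, best) := by
        unfold pvStepB; rw [if_pos hc]
      rw [if_pos hmem, hstep]
      exact ih seenS seenL best hsm
    · have hc : ¬ PySem.Set.contains seenS (pvJob t) = true := by
        simp only [PySem.Set.contains, List.contains_iff_mem]
        exact fun hh => hmem ((hsm _).mp hh)
      have hsm' : ∀ x, x ∈ PySem.Set.add seenS (pvJob t) ↔ x ∈ pvJob t :: seenL := by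
        intro x
        rw [PySem.Set.mem_add, List.mem_cons]
        constructor
        · rintro (h | h)
          exacts [Or.inr ((hsm x).mp h), Or.inl h]
        · rintro (h | h)
          exacts [Or.inr h, Or.inl ((hsm x).mpr h)]
      rw [if_neg hmem, List.foldl_cons]
      cases best with
      | none =>
        have hstep : pvStepB languages preferences (seenS, none) t
            = (PySem.Set.add seenS (pvJob t),
                some (pvJob t, pvScore languages preferences t)) := by
          unfold pvStepB; rw [if_neg hc]
        rw [hstep]
        exact ih _ _ _ hsm'
      | some b =>
        dsimp only
        by_cases hb : pvScore languages preferences t > b.2 ∨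
            (pvScore languages preferences t = b.2 ∧ pvJob t < b.1)
        · have hstep : pvStepB languages preferences (seenS, some b) t
              = (PySem.Set.add seenS (pvJob t),
                  some (pvJob t, pvScore languages preferences t)) := by
            unfold pvStepB; rw [if_neg hc]; dsimp only; rw [if_pos hb]
          rw [hstep, if_pos hb]
          exact ih _ _ _ hsm'
        · have hstep : pvStepB languages preferences (seenS, some b) t
              = (PySem.Set.add seenS (pvJob t), some b) := by
            unfold pvStepB; rw [if_neg hc]; dsimp only; rw [if_neg hb]
          rw [hstep, if_neg hb]
          exact ih _ _ _ hsm'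

-- the dict the tables loop builds: its lookup is the score of the LAST table with that job
theorem pv_get_fold (languages : List String) (preferences : List Int) (ts : List String) (k : String) :
    (ts.foldl (fun d t => d.insert (pvJob t) (pvScore languages preferences t))
        (PySem.Dict.empty : PySem.Dict String Int)).get? k
      = (ts.reverse.find? (fun t => pvJob t == k)).map (pvScore languages preferences) := by
  induction ts using List.reverseRecOn with
  | nil => simp [PySem.Dict.get?_empty]
  | append_singleton ts t ih =>
    rw [List.foldl_append, List.foldl_cons, List.foldl_nil, List.reverse_append]
    simp only [List.reverse_singleton, List.singleton_append, List.find?_cons]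
    by_cases h : pvJob t = k
    · rw [PySem.Dict.get?_insert, if_pos h.symm]
      simp [h]
    · rw [PySem.Dict.get?_insert, if_neg (fun hh => h hh.symm)]
      rw [ih]
      have : (pvJob t == k) = false := by simpa using h
      rw [this]

-- membership in pvDedup: first occurrence per job, not previously seen
theorem pv_mem_dedup (languages : List String) (preferences : List Int) :
    ∀ (R : List String) (seen : List String) (x : String × Int),
      x ∈ pvDedup languages preferences seen R
        ↔ x.1 ∉ seen ∧
          (R.find? (fun t => pvJob t == x.1)).map (pvScore languages preferences) = some x.2 := by
  intro R
  induction R with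
  | nil => intro seen x; simp [pvDedup]
  | cons t R ih =>
    intro seen x
    rw [pvDedup]
    by_cases hmem : pvJob t ∈ seen
    · rw [if_pos hmem, ih]
      by_cases hx : pvJob t = x.1
      · constructor <;> (rintro ⟨h1, _⟩; exact absurd (hx ▸ hmem) h1)
      · rw [List.find?_cons_of_neg (by simpa using hx)]
    · rw [if_neg hmem, List.mem_cons, ih]
      by_cases hx : pvJob t = x.1
      · rw [List.find?_cons_of_pos (by simpa using hx)]
        constructor
        · rintro (h | ⟨h1, _⟩)
          · subst h
            exact ⟨by simpa using hmem, by simp⟩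
          · exact absurd (by rw [← hx]; exact List.mem_cons_self) h1
        · rintro ⟨h1, h2⟩
          left
          have h2' : pvScore languages preferences t = x.2 := by simpa using h2
          exact Prod.ext (by rw [← hx]) (by rw [← h2'])
      · rw [List.find?_cons_of_neg (by simpa using hx)]
        constructor
        · rintro (h | ⟨h1, h2⟩)
          · exact absurd (congrArg Prod.fst h).symm hx
          · exact ⟨fun hh => h1 (List.mem_cons_of_mem _ hh), h2⟩
        · rintro ⟨h1, h2⟩
          right
          refine ⟨?_, h2⟩
          intro hh
          rcases List.mem_cons.mp hh with h | h
          exacts [hx h.symm, h1 h]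

-- membership transport between A's score_dict items and B's processed pairs
theorem pv_items_iff_dedup (languages : List String) (preferences : List Int)
    (tables : List String) (x : String × Int) :
    x ∈ (tables.foldl (fun d t => d.insert (pvJob t) (pvScore languages preferences t))
        (PySem.Dict.empty : PySem.Dict String Int)).items
      ↔ x ∈ pvDedup languages preferences [] tables.reverse := by
  have hnd : (tables.foldl (fun d t => d.insert (pvJob t) (pvScore languages preferences t))
      (PySem.Dict.empty : PySem.Dict String Int)).keys.Nodup :=
    PySem.Dict.nodup_keys_foldl_insert_key tables pvJob
      (fun _ t => pvScore languages preferences t) PySem.Dict.empty PySem.Dict.nodup_keys_empty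
  rw [pv_mem_dedup]
  rw [← pv_get_fold]
  constructor
  · intro hx
    refine ⟨by simp, ?_⟩
    have := (PySem.Dict.get?_eq_some_iff_mem_items _ x.1 x.2 hnd).mpr hx
    exact this
  · rintro ⟨_, h⟩
    exact (PySem.Dict.get?_eq_some_iff_mem_items _ x.1 x.2 hnd).mp h

-- ===== VERDICT (by name: the statement is the Claim_ definition above) =====
theorem solution_spec : Claim_equal_solution := by
  intro tables languages preferences _ hpre
  obtain ⟨hne, htok⟩ := hpre
  unfold Spec_solution solution solution_alt
  simp only []
  rw [show List.foldl (fun (d : PySem.Dict String Int) (p : String × Int) => d.insert p.1 p.2)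
        PySem.Dict.empty (languages.zip preferences) = pvCand languages preferences from rfl]
  -- A's score_dict fold is an insert loop keyed by job, valued by the (shared) score
  have hbodyA : tables.foldl (fun d table =>
      match PySem.Str.split₀ table with
      | [] => d
      | job :: priority_language_list =>
          d.insert job (((pvCand languages preferences).items.foldl
            (fun total_score p =>
              if ((PySem.List.enumerate priority_language_list).foldl
                    (fun pd q => pd.insert q.2 (5 - q.1)) PySem.Dict.empty).contains p.1 then
                total_score + p.2 * ((PySem.List.enumerate priority_language_list).foldl
                    (fun pd q => pd.insert q.2 (5 - q.1)) PySem.Dict.empty).getD p.1 0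
              else total_score) 0))) PySem.Dict.empty
      = tables.foldl (fun d t => d.insert (pvJob t) (pvScore languages preferences t)) PySem.Dict.empty := by
    apply PySem.List.foldl_congr_mem
    intro acc t ht
    cases hsp : PySem.Str.split₀ t with
    | nil => exact absurd hsp (htok t ht)
    | cons job rest =>
      have := pv_get_score_eq languages preferences t
      unfold pvScoreA at this
      simp only [pvJob, pvPrio, hsp, List.headD_cons, List.tail_cons] at this ⊢
      rw [this]
  rw [hbodyA]
  rw [pv_sorted2_eq]
  -- B's backward loop
  have hbodyB : tables.reverse.foldl (fun st table =>
      match PySem.Str.split₀ table with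
      | [] => st
      | job :: langs =>
          if PySem.Set.contains st.1 job then st
          else
            match st.2 with
            | none => (PySem.Set.add st.1 job, some (job,
                (((PySem.List.enumerate langs).foldl
                    (fun d q => d.insert q.2 (5 - q.1)) PySem.Dict.empty).items.map
                  (fun q => (pvCand languages preferences).getD q.1 0 * q.2)).sum))
            | some b =>
                if (((PySem.List.enumerate langs).foldl
                      (fun d q => d.insert q.2 (5 - q.1)) PySem.Dict.empty).items.map
                    (fun q => (pvCand languages preferences).getD q.1 0 * q.2)).sum > b.2 ∨
                    ((((PySem.List.enumerate langs).foldl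
                      (fun d q => d.insert q.2 (5 - q.1)) PySem.Dict.empty).items.map
                    (fun q => (pvCand languages preferences).getD q.1 0 * q.2)).sum = b.2 ∧ job < b.1)
                then (PySem.Set.add st.1 job, some (job,
                  (((PySem.List.enumerate langs).foldl
                      (fun d q => d.insert q.2 (5 - q.1)) PySem.Dict.empty).items.map
                    (fun q => (pvCand languages preferences).getD q.1 0 * q.2)).sum))
                else (PySem.Set.add st.1 job, st.2)) (PySem.Set.empty, none)
      = tables.reverse.foldl (pvStepB languages preferences) (PySem.Set.empty, none) := by
    apply PySem.List.foldl_congr_mem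
    intro acc t ht
    rw [List.mem_reverse] at ht
    cases hsp : PySem.Str.split₀ t with
    | nil => exact absurd hsp (htok t ht)
    | cons job langs =>
      unfold pvStepB
      simp only [pvJob, pvScore, pvPrio, hsp, List.headD_cons, List.tail_cons]
  rw [hbodyB]
  rw [pv_foldB languages preferences tables.reverse PySem.Set.empty [] none (by simp [PySem.Set.empty])]
  -- name the two (job, score) lists
  have hiff := pv_items_iff_dedup languages preferences tables
  cases hLB : pvDedup languages preferences [] tables.reverse with
  | nil =>
    exfalso
    cases hrev : tables.reverse with
    | nil => exact hne (by simpa using congrArg List.reverse hrev)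
    | cons t0 ts' =>
      rw [hrev] at hLB
      rw [pvDedup, if_neg (by simp)] at hLB
      exact List.cons_ne_nil _ _ hLB
  | cons p0 rest =>
    rw [List.foldl_cons]
    obtain ⟨r, hr, hmemr, hrmin⟩ := pv_runmin rest p0
    rw [hr]
    have hrLB : r ∈ pvDedup languages preferences [] tables.reverse := by
      rw [hLB]
      rcases hmemr with h | h
      · rw [h]; exact List.mem_cons_self
      · exact List.mem_cons_of_mem _ h
    have hrmin' : ∀ y ∈ pvDedup languages preferences [] tables.reverse,
        ¬ (pvKey y < pvKey r) := by
      intro y hy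
      rw [hLB] at hy
      exact hrmin y hy
    -- A's side: the sorted items list is nonempty
    cases hs : PySem.List.sorted (tables.foldl (fun d t =>
        d.insert (pvJob t) (pvScore languages preferences t)) PySem.Dict.empty).items pvKey false with
    | nil =>
      exfalso
      have : (tables.foldl (fun d t => d.insert (pvJob t) (pvScore languages preferences t))
          PySem.Dict.empty).items = [] :=
        (PySem.List.sorted_eq_nil_iff _ pvKey false).mp hs
      have hp0 : p0 ∈ pvDedup languages preferences [] tables.reverse := by
        rw [hLB]; exact List.mem_cons_self
      rw [← hiff p0, this] at hp0
      exact List.not_mem_nil hp0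
    | cons m tl =>
      have hmmin : ∀ y ∈ (tables.foldl (fun d t =>
          d.insert (pvJob t) (pvScore languages preferences t)) PySem.Dict.empty).items,
          pvKey m ≤ pvKey y := PySem.List.key_head_sorted_le _ pvKey hs
      have hmI : m ∈ (tables.foldl (fun d t =>
          d.insert (pvJob t) (pvScore languages preferences t)) PySem.Dict.empty).items := by
        have : m ∈ PySem.List.sorted (tables.foldl (fun d t =>
            d.insert (pvJob t) (pvScore languages preferences t)) PySem.Dict.empty).items pvKey false := by
          rw [hs]; simp
        exact (PySem.List.mem_sorted _ _ _ _).mp this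
      have hkey : pvKey m = pvKey r :=
        le_antisymm (hmmin r ((hiff r).mpr hrLB)) (not_lt.mp (hrmin' m ((hiff m).mp hmI)))
      have hname : m.1 = r.1 := congrArg (fun z : Lex (Int × String) => (ofLex z).2) hkey
      have hmax : PySem.List.max? (m :: tl) (fun x : String × Int => x.2) = some m := by
        have hunf : PySem.List.max? (m :: tl) (fun x : String × Int => x.2)
            = (m :: tl).foldl (fun acc x => match acc with
              | none => some x
              | some mm => if mm.2 < x.2 then some x else some mm) none := by
          unfold PySem.List.max?
          congr 1
          funext acc x
          cases acc <;> rfl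
        rw [hunf, List.foldl_cons]
        apply pv_max?_stays
        intro y hy
        have hyI : y ∈ (tables.foldl (fun d t =>
            d.insert (pvJob t) (pvScore languages preferences t)) PySem.Dict.empty).items :=
          (PySem.List.mem_sorted _ _ _ _).mp (by rw [hs]; exact List.mem_cons_of_mem _ hy)
        have := hmmin y hyI
        unfold pvKey at this
        rw [Prod.Lex.toLex_le_toLex] at this
        rcases this with h | ⟨h, _⟩ <;> omega
      rw [hmax]
      simp [hname]
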